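-- pv_equiv track=rewrite | github.com/danielWatson3141/coderID | 2984486(small)/kevinleeone/5634947029139456/0/extracted/dum.py | recurse
-- ===== SOURCE A (Python) =====
-- def flip(l, n):
--     flipper = 1 << n
--     for i in range(len(l)):
--         l[i] ^= flipper
--     return
--
-- def recurse(outlets, required, cur):
--     if cur < 0:
--         if set(outlets) ^ set(required):
--             return -1
--         else:
--             return 0
--     num1 = recurse(outlets, required, cur - 1)
--     flip(outlets, cur)
--     num2 = recurse(outlets, required, cur - 1)
--     flip(outlets, cur)
--     num2 = num2 + 1 if num2 != -1 else num2
--     if num1 == -1: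
--         return num2
--     elif num2 == -1:
--         return num1
--     else:
--         return min(num1, num2)
-- ===== SOURCE B (Python) =====
-- def recurse(outlets, required, cur):
--     # Any uniform-flip mask m must map outlets[0] onto some required element,
--     # so only the masks outlets[0]^r (r in required) can work: validate each
--     # and keep the minimum bit count, instead of searching all 2^(cur+1) masks.
--     if not outlets:
--         return 0 if not required else -1
--     bits = cur + 1 if cur >= 0 else 0
--     req = set(required)
--     best = -1
--     for r in required:
--         m = outlets[0] ^ r
--         if m < 0 or m.bit_length() > bits:
--             continue
--         if {x ^ m for x in outlets} == req:
--             c = bin(m).count("1")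
--             if best == -1 or c < best:
--                 best = c
--     return best
-- ===== Notes on version B (the rewrite author's own statement) =====
-- stated objective: faster
-- what changed: Replaces A's exhaustive recursion over all 2^(cur+1) uniform flip masks by direct candidate derivation: any mask that works must equal outlets[0]^r for some r in required, so B validates at most len(required) candidate masks (sign, bit range, set equality) and returns the minimum popcount.
-- outside the precondition, e.g. on recurse([1], [1], 20000): A raises RecursionError, B returns 0
import Mathlib
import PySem

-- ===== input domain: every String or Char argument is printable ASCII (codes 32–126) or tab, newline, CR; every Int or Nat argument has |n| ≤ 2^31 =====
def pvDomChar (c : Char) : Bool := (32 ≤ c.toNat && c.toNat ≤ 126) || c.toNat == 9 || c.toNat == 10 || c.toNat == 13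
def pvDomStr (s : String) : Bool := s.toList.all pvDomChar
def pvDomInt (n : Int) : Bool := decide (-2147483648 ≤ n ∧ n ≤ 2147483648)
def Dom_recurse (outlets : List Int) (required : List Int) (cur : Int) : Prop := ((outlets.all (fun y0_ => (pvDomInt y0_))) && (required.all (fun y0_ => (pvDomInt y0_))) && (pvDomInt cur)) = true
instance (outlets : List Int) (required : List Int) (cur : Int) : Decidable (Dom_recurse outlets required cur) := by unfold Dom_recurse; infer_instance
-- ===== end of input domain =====

-- B derives the candidate masks outlets[0]^r directly instead of A's exhaustive recursion
-- over all 2^(cur+1) masks (objective: faster). A temporarily flips `outlets` in place but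
-- restores it before returning, so the comparison is about the (unchanged) return value.

-- ===== PORT A =====
-- flip(l, n): l[i] ^= (1 << n) for every i (A always calls it with n = cur ≥ 0)
def pyFlip (l : List Int) (n : Int) : List Int :=
  let flipper : Int := (2 : Int) ^ n.toNat
  l.map (fun x => PySem.Int.bxor x flipper)

def recurse (outlets : List Int) (required : List Int) (cur : Int) : Int :=
  if cur < 0 then
    if PySem.Set.symmDiff (PySem.Set.ofList outlets) (PySem.Set.ofList required) ≠ [] then -1
    else 0
  else
    let num1 := recurse outlets required (cur - 1)
    let num2 := recurse (pyFlip outlets cur) required (cur - 1)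
    let num2 := if num2 ≠ -1 then num2 + 1 else num2
    if num1 = -1 then num2
    else if num2 = -1 then num1
    else min num1 num2
termination_by (cur + 1).toNat
decreasing_by all_goals omega

-- ===== PORT B =====
-- the loop body of Source B ('continue' = keep best; the two tests in source order)
def altStep (o bits : Int) (outlets : List Int) (req : PySem.Set Int) (best r : Int) : Int :=
  let m := PySem.Int.bxor o r
  if m < 0 ∨ bits < (PySem.Int.bitLength m : Int) then best
  else if PySem.Set.equal (PySem.Set.ofList (outlets.map (fun x => PySem.Int.bxor x m))) req then
    let c : Int := (PySem.Int.bitCount m : Int)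
    if best = -1 ∨ c < best then c else best
  else best

def recurse_alt (outlets : List Int) (required : List Int) (cur : Int) : Int :=
  match outlets with
  | [] => if required.isEmpty then 0 else -1
  | o :: _ =>
    let bits : Int := if 0 ≤ cur then cur + 1 else 0
    let req : PySem.Set Int := PySem.Set.ofList required
    required.foldl (altStep o bits outlets req) (-1)

-- ===== PRECONDITION & SPEC =====
-- A's first step recurses straight down cur+2 frames, so for cur at or beyond CPython's
-- recursion limit (default 1000) it raises RecursionError before returning anything;
-- Pre_ excludes exactly those inputs (cur < 1000) and nothing else.
def Pre_recurse (outlets : List Int) (required : List Int) (cur : Int) : Prop := cur < 1000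
instance (outlets : List Int) (required : List Int) (cur : Int) : Decidable (Pre_recurse outlets required cur) := by unfold Pre_recurse; infer_instance
def pvWitness_recurse : List Int × List Int × Int := ([1, 2], [1, 2], 3)

def Spec_recurse (outlets : List Int) (required : List Int) (cur : Int) (out : Int) : Prop := out = recurse_alt outlets required cur
instance (outlets : List Int) (required : List Int) (cur : Int) (out : Int) : Decidable (Spec_recurse outlets required cur out) := by unfold Spec_recurse; infer_instance

-- ===== CLAIM (what is proved, stated in full; the proofs are below) =====
def Claim_equal_recurse : Prop := ∀ (outlets : List Int) (required : List Int) (cur : Int), Dom_recurse outlets required cur → Pre_recurse outlets required cur → Spec_recurse outlets required cur (recurse outlets required cur)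

-- ===== LEMMAS AND PROOFS =====

-- the popcount of a mask, as both ports compute it
def bcN (m : Nat) : Nat := PySem.Int.bitCount (m : Int)

-- mask m makes the flipped outlet set equal the required set
def maskOK (l req : List Int) (m : Nat) : Bool :=
  PySem.Set.equal (PySem.Set.ofList (l.map (fun x => PySem.Int.bxor x (m : Int)))) (PySem.Set.ofList req)

-- popcounts of all working masks below 2^n, and their minimum as A/B report it
def cands (l req : List Int) (n : Nat) : List Nat :=
  ((List.range (2 ^ n)).filter (maskOK l req)).map bcN

def optMin (xs : List Nat) : Int :=
  match xs.min? with
  | none => -1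
  | some c => (c : Int)

def best (l req : List Int) (n : Nat) : Int := optMin (cands l req n)

-- fuel form of A's recursion (fuel n = number of allowed low bits = cur + 1)
def refA (l req : List Int) : Nat → Int
  | 0 => if PySem.Set.symmDiff (PySem.Set.ofList l) (PySem.Set.ofList req) ≠ [] then -1 else 0
  | n + 1 =>
    let num1 := refA l req n
    let num2 := refA (l.map (fun x => PySem.Int.bxor x ((2 ^ n : Nat) : Int))) req n
    let num2 := if num2 ≠ -1 then num2 + 1 else num2
    if num1 = -1 then num2
    else if num2 = -1 then num1
    else min num1 num2

-- B-side loop bookkeeping: which required elements give an admissible mask, its cost, min-merging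
def goodB (o : Int) (n : Nat) (l : List Int) (s : PySem.Set Int) (r : Int) : Bool :=
  !decide (PySem.Int.bxor o r < 0 ∨ (n : Int) < (PySem.Int.bitLength (PySem.Int.bxor o r) : Int)) &&
  PySem.Set.equal (PySem.Set.ofList (l.map (fun x => PySem.Int.bxor x (PySem.Int.bxor o r)))) s

def bcost (o r : Int) : Nat := PySem.Int.bitCount (PySem.Int.bxor o r)

def combMin (b v : Int) : Int := if b = -1 then v else if v = -1 then b else min b v

-- ==== generic Nat/Int bit facts ====

lemma nat_xor_two_pow_add (n : Nat) : ∀ m : Nat, m < 2 ^ n → 2 ^ n ^^^ m = 2 ^ n + m := by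
  induction n with
  | zero => intro m hm; interval_cases m <;> decide
  | succ k ih =>
    intro m hm
    have hbit : m = Nat.bit (decide (m % 2 = 1)) (m / 2) := by
      rcases Nat.mod_two_eq_zero_or_one m with h | h <;> simp [Nat.bit, h] <;> omega
    have h2 : 2 ^ (k + 1) = Nat.bit false (2 ^ k) := by simp [Nat.bit]; ring
    rw [h2, hbit, Nat.xor_bit]
    have hm2 : m / 2 < 2 ^ k := by
      have : 2 ^ (k + 1) = 2 * 2 ^ k := by ring
      omega
    rw [ih (m / 2) hm2]
    rcases Nat.mod_two_eq_zero_or_one m with h | h <;> simp [Nat.bit, h] <;> omega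

lemma bcN_zero : bcN 0 = 0 := by decide

lemma bcN_rec (m : Nat) (h : 0 < m) : bcN m = m % 2 + bcN (m / 2) := PySem.Int.bitCount_natCast h

lemma bcN_two_pow_add (n : Nat) : ∀ m : Nat, m < 2 ^ n → bcN (2 ^ n + m) = bcN m + 1 := by
  induction n with
  | zero => intro m hm; interval_cases m; decide
  | succ k ih =>
    intro m hm
    have h2k : 2 ^ (k + 1) = 2 * 2 ^ k := by ring
    have hmod : (2 ^ (k + 1) + m) % 2 = m % 2 := by omega
    have hdiv : (2 ^ (k + 1) + m) / 2 = 2 ^ k + m / 2 := by omega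
    have hm2 : m / 2 < 2 ^ k := by omega
    have h1 : bcN (2 ^ (k + 1) + m) = m % 2 + bcN (2 ^ k + m / 2) := by
      rw [bcN_rec _ (by positivity), hmod, hdiv]
    rw [ih (m / 2) hm2] at h1
    rcases Nat.eq_zero_or_pos m with rfl | hpos
    · simp [bcN_zero] at h1 ⊢
      omega
    · have h3 := bcN_rec m hpos
      omega

lemma bitLength_le_iff (m n : Nat) : PySem.Int.bitLength (m : Int) ≤ n ↔ m < 2 ^ n := by
  constructor
  · intro h
    have h1 := PySem.Int.lt_two_pow_bitLength (m : Int)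
    rw [Int.natAbs_natCast] at h1
    calc m < 2 ^ PySem.Int.bitLength (m : Int) := h1
    _ ≤ 2 ^ n := Nat.pow_le_pow_right (by omega) h
  · intro h
    by_contra hc
    have hm0 : m ≠ 0 := by
      rintro rfl
      rw [Nat.cast_zero, PySem.Int.bitLength_zero] at hc
      omega
    have h2 := PySem.Int.two_pow_bitLength_le (m : Int) (Int.natCast_ne_zero.mpr hm0)
    rw [Int.natAbs_natCast] at h2
    have h3 : n ≤ PySem.Int.bitLength (m : Int) - 1 := by omega
    have h4 : (2 : Nat) ^ n ≤ 2 ^ (PySem.Int.bitLength (m : Int) - 1) :=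
      Nat.pow_le_pow_right (by omega) h3
    omega

lemma bxor_bxor_natCast (x : Int) (a b : Nat) :
    PySem.Int.bxor (PySem.Int.bxor x (a : Int)) (b : Int) = PySem.Int.bxor x ((a ^^^ b : Nat) : Int) := by
  by_cases hx : 0 ≤ x
  · rw [PySem.Int.bxor_of_nonneg hx (Int.natCast_nonneg a),
        PySem.Int.bxor_of_nonneg hx (Int.natCast_nonneg _),
        PySem.Int.bxor_natCast, Int.toNat_natCast, Int.toNat_natCast, Nat.xor_assoc]
  · have h1 : PySem.Int.bxor x (a : Int) = -(((-x - 1).toNat ^^^ a : Nat) : Int) - 1 := by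
      unfold PySem.Int.bxor
      rw [if_neg hx, if_pos (Int.natCast_nonneg a), Int.toNat_natCast]
    have h2 : PySem.Int.bxor x ((a ^^^ b : Nat) : Int) = -(((-x - 1).toNat ^^^ (a ^^^ b) : Nat) : Int) - 1 := by
      unfold PySem.Int.bxor
      rw [if_neg hx, if_pos (Int.natCast_nonneg _), Int.toNat_natCast]
    rw [h1, h2]
    set K : Nat := (-x - 1).toNat ^^^ a with hK
    have hKneg : ¬ (0 : Int) ≤ -(K : Int) - 1 := by
      have := Int.natCast_nonneg K; omega
    have h3 : PySem.Int.bxor (-(K : Int) - 1) (b : Int) = -((K ^^^ b : Nat) : Int) - 1 := by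
      unfold PySem.Int.bxor
      rw [if_neg hKneg, if_pos (Int.natCast_nonneg b)]
      have h4 : (-(-(K : Int) - 1) - 1).toNat = K := by omega
      rw [h4, Int.toNat_natCast]
    rw [h3, hK, Nat.xor_assoc]

lemma bxor_bxor_natCast_cancel (x : Int) (m : Nat) :
    PySem.Int.bxor x (PySem.Int.bxor x (m : Int)) = (m : Int) := by
  by_cases hx : 0 ≤ x
  · rw [PySem.Int.bxor_of_nonneg hx (Int.natCast_nonneg m)]
    rw [PySem.Int.bxor_of_nonneg hx (Int.natCast_nonneg _), Int.toNat_natCast]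
    rw [Nat.xor_xor_cancel_left, Int.toNat_natCast]
  · have h1 : PySem.Int.bxor x (m : Int) = -(((-x - 1).toNat ^^^ m : Nat) : Int) - 1 := by
      unfold PySem.Int.bxor
      rw [if_neg hx, if_pos (Int.natCast_nonneg m), Int.toNat_natCast]
    rw [h1]
    unfold PySem.Int.bxor
    set K : Nat := (-x - 1).toNat ^^^ m with hK
    have hKneg : ¬ (0 : Int) ≤ -(K : Int) - 1 := by
      have := Int.natCast_nonneg K; omega
    rw [if_neg hx, if_neg hKneg]
    have h4 : (-(-(K : Int) - 1) - 1).toNat = K := by omega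
    rw [h4, hK, Nat.xor_xor_cancel_left]

-- ==== set-equality bridges ====

lemma symmDiff_nil_iff (l req : List Int) :
    PySem.Set.symmDiff (PySem.Set.ofList l) (PySem.Set.ofList req) = [] ↔ ∀ x, x ∈ l ↔ x ∈ req := by
  rw [List.eq_nil_iff_forall_not_mem]
  constructor
  · intro h x
    have h1 := h x
    rw [PySem.Set.mem_symmDiff] at h1
    rw [PySem.Set.mem_ofList, PySem.Set.mem_ofList] at h1
    tauto
  · intro h x hx
    rw [PySem.Set.mem_symmDiff, PySem.Set.mem_ofList, PySem.Set.mem_ofList] at hx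
    have := h x
    tauto

lemma maskOK_iff (l req : List Int) (m : Nat) :
    maskOK l req m = true ↔ ∀ x, (x ∈ l.map (fun y => PySem.Int.bxor y (m : Int)) ↔ x ∈ req) := by
  unfold maskOK
  rw [PySem.Set.equal_iff]
  constructor
  · intro h x; have := h x; rw [PySem.Set.mem_ofList, PySem.Set.mem_ofList] at this; exact this
  · intro h x; rw [PySem.Set.mem_ofList, PySem.Set.mem_ofList]; exact h x

lemma map_bxor_zero (l : List Int) : l.map (fun y => PySem.Int.bxor y ((0 : Nat) : Int)) = l := by
  have : ∀ y ∈ l, PySem.Int.bxor y ((0 : Nat) : Int) = y := by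
    intro y _; rw [Nat.cast_zero, PySem.Int.bxor_zero]
  calc l.map (fun y => PySem.Int.bxor y ((0 : Nat) : Int)) = l.map id := List.map_congr_left (by simpa using this)
  _ = l := List.map_id l

-- ==== optMin facts ====

lemma min?_congr_mem (xs ys : List Nat) (h : ∀ a, a ∈ xs ↔ a ∈ ys) : xs.min? = ys.min? := by
  cases hx : xs.min? with
  | none =>
    rw [List.min?_eq_none_iff] at hx
    subst hx
    cases hy : ys.min? with
    | none => rfl
    | some b =>
      have hb : b ∈ ys := by
        rw [List.min?_eq_some_iff] at hy
        exact hy.1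
      rw [← h b] at hb
      simp at hb
  | some a =>
    rw [List.min?_eq_some_iff] at hx
    symm
    rw [List.min?_eq_some_iff]
    exact ⟨(h a).mp hx.1, fun b hb => hx.2 b ((h b).mpr hb)⟩

lemma optMin_congr_mem (xs ys : List Nat) (h : ∀ a, a ∈ xs ↔ a ∈ ys) : optMin xs = optMin ys := by
  unfold optMin
  rw [min?_congr_mem xs ys h]

lemma optMin_comb (xs ys : List Nat) :
    (if optMin xs = -1 then (if optMin ys ≠ -1 then optMin ys + 1 else optMin ys)
     else if (if optMin ys ≠ -1 then optMin ys + 1 else optMin ys) = -1 then optMin xs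
     else min (optMin xs) (if optMin ys ≠ -1 then optMin ys + 1 else optMin ys))
    = optMin (xs ++ ys.map (· + 1)) := by
  cases hx : xs.min? with
  | none =>
    have hxs : xs = [] := List.min?_eq_none_iff.mp hx
    subst hxs
    cases hy : ys.min? with
    | none =>
      have hys : ys = [] := List.min?_eq_none_iff.mp hy
      subst hys
      simp [optMin]
    | some b =>
      have hy' := List.min?_eq_some_iff.mp hy
      have hmap : (ys.map (· + 1)).min? = some (b + 1) := by
        rw [List.min?_eq_some_iff]
        refine ⟨List.mem_map.mpr ⟨b, hy'.1, rfl⟩, ?_⟩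
        intro c hc
        obtain ⟨d, hd, rfl⟩ := List.mem_map.mp hc
        have := hy'.2 d hd; omega
      have hb0 : (0 : Int) ≤ (b : Int) := Int.natCast_nonneg b
      simp only [optMin, hy, hmap, List.min?_nil, List.nil_append]
      rw [if_pos trivial, if_pos (by omega : ¬((b : Int) = -1))]
      push_cast; ring
  | some a =>
    have ha' := List.min?_eq_some_iff.mp hx
    have ha0 : (0 : Int) ≤ (a : Int) := Int.natCast_nonneg a
    cases hy : ys.min? with
    | none =>
      have hys : ys = [] := List.min?_eq_none_iff.mp hy
      subst hys
      simp only [optMin, hx, List.map_nil, List.append_nil, List.min?_nil]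
      rw [if_neg (by omega : ¬((a : Int) = -1))]
      simp
    | some b =>
      have hb' := List.min?_eq_some_iff.mp hy
      have hb0 : (0 : Int) ≤ (b : Int) := Int.natCast_nonneg b
      have happ : (xs ++ ys.map (· + 1)).min? = some (min a (b + 1)) := by
        rw [List.min?_eq_some_iff]
        constructor
        · rcases le_total a (b + 1) with h | h
          · rw [min_eq_left h]; exact List.mem_append.mpr (Or.inl ha'.1)
          · rw [min_eq_right h]
            exact List.mem_append.mpr (Or.inr (List.mem_map.mpr ⟨b, hb'.1, rfl⟩))
        · intro c hc
          rcases List.mem_append.mp hc with h | h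
          · have := ha'.2 c h; omega
          · obtain ⟨d, hd, rfl⟩ := List.mem_map.mp h
            have := hb'.2 d hd; omega
      simp only [optMin, hx, hy, happ]
      rw [if_neg (by omega : ¬((a : Int) = -1)), if_pos (by omega : ¬((b : Int) = -1)),
          if_neg (by omega : ¬((b : Int) + 1 = -1))]
      push_cast
      omega

-- ==== A = best ====

lemma cands_succ (l req : List Int) (n : Nat) :
    cands l req (n + 1)
      = cands l req n
        ++ (cands (l.map (fun x => PySem.Int.bxor x ((2 ^ n : Nat) : Int))) req n).map (· + 1) := by
  unfold cands
  have h2 : 2 ^ (n + 1) = 2 ^ n + 2 ^ n := by ring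
  rw [h2, List.range_add, List.filter_append, List.map_append]
  congr 1
  rw [List.filter_map, List.map_map, List.map_map]
  have hfil : (List.range (2 ^ n)).filter (maskOK l req ∘ fun x => 2 ^ n + x)
      = (List.range (2 ^ n)).filter (maskOK (l.map (fun x => PySem.Int.bxor x ((2 ^ n : Nat) : Int))) req) := by
    apply List.filter_congr
    intro m hm
    have hm' : m < 2 ^ n := List.mem_range.mp hm
    have hlist : l.map (fun x => PySem.Int.bxor x ((2 ^ n + m : Nat) : Int))
        = (l.map (fun x => PySem.Int.bxor x ((2 ^ n : Nat) : Int))).map (fun x => PySem.Int.bxor x (m : Int)) := by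
      rw [List.map_map]
      apply List.map_congr_left
      intro x _
      show PySem.Int.bxor x ((2 ^ n + m : Nat) : Int)
          = PySem.Int.bxor (PySem.Int.bxor x ((2 ^ n : Nat) : Int)) (m : Int)
      rw [bxor_bxor_natCast, nat_xor_two_pow_add n m hm']
    show maskOK l req (2 ^ n + m) = maskOK _ req m
    unfold maskOK
    rw [hlist]
  rw [hfil]
  apply List.map_congr_left
  intro m hm
  have hm' : m < 2 ^ n := List.mem_range.mp (List.mem_of_mem_filter hm)
  show bcN (2 ^ n + m) = bcN m + 1
  exact bcN_two_pow_add n m hm'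

lemma refA_eq_best (req : List Int) : ∀ (n : Nat) (l : List Int), refA l req n = best l req n := by
  intro n
  induction n with
  | zero =>
    intro l
    by_cases hsame : ∀ x, x ∈ l ↔ x ∈ req
    · have hOK : maskOK l req 0 = true := by
        rw [maskOK_iff]
        intro x
        rw [map_bxor_zero]
        exact hsame x
      simp only [refA, best, cands, pow_zero, List.range_one, optMin]
      rw [if_neg (not_not_intro ((symmDiff_nil_iff l req).mpr hsame))]
      rw [List.filter_cons_of_pos (by simpa using hOK), List.filter_nil]
      simp [bcN_zero]
    · have hOK : maskOK l req 0 = false := by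
        by_contra hc
        rw [Bool.not_eq_false, maskOK_iff] at hc
        exact hsame (fun x => by rw [← map_bxor_zero l]; exact hc x)
      simp only [refA, best, cands, pow_zero, List.range_one, optMin]
      rw [if_pos (fun h => hsame ((symmDiff_nil_iff l req).mp h))]
      rw [List.filter_cons_of_neg (by simpa using hOK), List.filter_nil]
      simp
  | succ n ih =>
    intro l
    simp only [refA]
    rw [ih l, ih (l.map (fun x => PySem.Int.bxor x ((2 ^ n : Nat) : Int)))]
    show (if best l req n = -1 then _ else _) = best l req (n + 1)
    unfold best
    rw [cands_succ]
    exact optMin_comb _ _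

lemma recurse_eq_refA (req : List Int) :
    ∀ (n : Nat) (cur : Int), (cur + 1).toNat = n → ∀ l, recurse l req cur = refA l req n := by
  intro n
  induction n with
  | zero =>
    intro cur hcur l
    have hneg : cur < 0 := by omega
    rw [recurse, if_pos hneg]
    simp only [refA]
  | succ n ih =>
    intro cur hcur l
    have hpos : ¬ cur < 0 := by omega
    have h1 : (cur - 1 + 1).toNat = n := by omega
    have hflip : pyFlip l cur = l.map (fun x => PySem.Int.bxor x ((2 ^ n : Nat) : Int)) := by
      unfold pyFlip
      have ht : cur.toNat = n := by omega
      rw [ht]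
      have hf : (2 : Int) ^ n = ((2 ^ n : Nat) : Int) := by push_cast; ring
      rw [hf]
    rw [recurse, if_neg hpos]
    simp only []
    rw [ih (cur - 1) h1 l, hflip, ih (cur - 1) h1 (l.map (fun x => PySem.Int.bxor x ((2 ^ n : Nat) : Int)))]
    simp only [refA]

-- ==== B = best ====

lemma combMin_neg_one (v : Int) : combMin (-1) v = v := by
  unfold combMin
  rw [if_pos rfl]

lemma combMin_cons (b : Int) (c : Nat) (cs : List Nat) :
    combMin (if b = -1 ∨ (c : Int) < b then (c : Int) else b) (optMin cs)
      = combMin b (optMin (c :: cs)) := by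
  have hc0 : (0 : Int) ≤ (c : Int) := Int.natCast_nonneg c
  cases hm : cs.min? with
  | none =>
    have hnil : cs = [] := List.min?_eq_none_iff.mp hm
    subst hnil
    have h1 : ([c] : List Nat).min? = some c := by simp
    have h2 : optMin ([] : List Nat) = -1 := rfl
    have h3 : optMin [c] = (c : Int) := by simp [optMin, h1]
    rw [h2, h3]
    have h4 : ∀ X : Int, combMin X (-1) = X := by
      intro X
      unfold combMin
      split_ifs with hX h5
      · exact hX.symm
      · rfl
      · exact absurd rfl h5
    rw [h4]
    unfold combMin
    by_cases hb : b = -1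
    · rw [if_pos (Or.inl hb), if_pos hb]
    · by_cases hlt : (c : Int) < b
      · rw [if_pos (Or.inr hlt), if_neg hb, if_neg (by omega : ¬((c : Int) = -1))]
        exact (min_eq_right hlt.le).symm
      · rw [if_neg (by tauto : ¬(b = -1 ∨ (c : Int) < b)), if_neg hb, if_neg (by omega : ¬((c : Int) = -1))]
        exact (min_eq_left (by omega)).symm
  | some d =>
    have hd0 : (0 : Int) ≤ (d : Int) := Int.natCast_nonneg d
    have h1 : (c :: cs).min? = some (min c d) := by
      rw [List.min?_cons, hm]
      rfl
    simp only [optMin, hm, h1, combMin]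
    split_ifs <;> push_cast at * <;> omega

lemma foldl_altStep (o : Int) (n : Nat) (l : List Int) (s : PySem.Set Int) :
    ∀ (rs : List Int) (b : Int),
      rs.foldl (altStep o ((n : Nat) : Int) l s) b
        = combMin b (optMin ((rs.filter (goodB o n l s)).map (bcost o))) := by
  intro rs
  induction rs with
  | nil =>
    intro b
    simp only [List.foldl_nil, List.filter_nil, List.map_nil, optMin, List.min?_nil, combMin]
    split_ifs <;> omega
  | cons r rs ih =>
    intro b
    rw [List.foldl_cons, ih]
    by_cases hg : goodB o n l s r = true
    · have hg' := hg
      simp only [goodB, Bool.and_eq_true, Bool.not_eq_true', decide_eq_false_iff_not] at hg'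
      obtain ⟨hcond, hequal⟩ := hg'
      have hstep : altStep o ((n : Nat) : Int) l s b r
          = (if b = -1 ∨ ((bcost o r : Nat) : Int) < b then ((bcost o r : Nat) : Int) else b) := by
        unfold altStep bcost
        rw [if_neg hcond, if_pos hequal]
      rw [hstep, List.filter_cons_of_pos hg, List.map_cons, combMin_cons]
    · have hgf : goodB o n l s r = false := by
        revert hg; cases goodB o n l s r <;> simp
      have hg' := hgf
      simp only [goodB, Bool.and_eq_false_iff, Bool.not_eq_false', decide_eq_true_iff] at hg'
      have hstep : altStep o ((n : Nat) : Int) l s b r = b := by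
        unfold altStep
        rcases hg' with h | h
        · rw [if_pos h]
        · by_cases hcnd : PySem.Int.bxor o r < 0 ∨ ((n : Nat) : Int) < (PySem.Int.bitLength (PySem.Int.bxor o r) : Int)
          · rw [if_pos hcnd]
          · rw [if_neg hcnd, if_neg (by simp [h])]
      rw [hstep, List.filter_cons_of_neg (by simp [hgf])]

lemma bcosts_eq_cands_mem (o : Int) (t req : List Int) (n : Nat) (a : Nat) :
    a ∈ ((req.filter (goodB o n (o :: t) (PySem.Set.ofList req))).map (bcost o))
      ↔ a ∈ cands (o :: t) req n := by
  constructor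
  · intro h
    obtain ⟨r, hrmem, rfl⟩ := List.mem_map.mp h
    obtain ⟨hrreq, hg⟩ := List.mem_filter.mp hrmem
    simp only [goodB, Bool.and_eq_true, Bool.not_eq_true', decide_eq_false_iff_not] at hg
    obtain ⟨hcond, hequal⟩ := hg
    rw [not_or, not_lt, not_lt] at hcond
    obtain ⟨hm0, hbl⟩ := hcond
    have hmN : PySem.Int.bxor o r = (((PySem.Int.bxor o r).toNat : Nat) : Int) :=
      (Int.toNat_of_nonneg hm0).symm
    have hbl' : PySem.Int.bitLength ((((PySem.Int.bxor o r).toNat : Nat)) : Int) ≤ n := by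
      rw [← hmN]; exact_mod_cast hbl
    have hlt : (PySem.Int.bxor o r).toNat < 2 ^ n := (bitLength_le_iff _ n).mp hbl'
    apply List.mem_map.mpr
    refine ⟨(PySem.Int.bxor o r).toNat, ?_, ?_⟩
    · apply List.mem_filter.mpr
      refine ⟨List.mem_range.mpr hlt, ?_⟩
      unfold maskOK
      rw [← hmN]
      exact hequal
    · unfold bcN bcost
      rw [← hmN]
  · intro h
    obtain ⟨mm, hmm, rfl⟩ := List.mem_map.mp h
    obtain ⟨hmr, hok⟩ := List.mem_filter.mp hmm
    have hlt : mm < 2 ^ n := List.mem_range.mp hmr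
    have hiff := (maskOK_iff _ _ _).mp hok
    have hmemmap : PySem.Int.bxor o (mm : Int) ∈ (o :: t).map (fun y => PySem.Int.bxor y (mm : Int)) :=
      List.mem_map.mpr ⟨o, by simp, rfl⟩
    have hrreq : PySem.Int.bxor o (mm : Int) ∈ req := (hiff _).mp hmemmap
    have hcancel : PySem.Int.bxor o (PySem.Int.bxor o (mm : Int)) = (mm : Int) :=
      bxor_bxor_natCast_cancel o mm
    apply List.mem_map.mpr
    refine ⟨PySem.Int.bxor o (mm : Int), ?_, ?_⟩
    · apply List.mem_filter.mpr
      refine ⟨hrreq, ?_⟩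
      simp only [goodB, Bool.and_eq_true, Bool.not_eq_true', decide_eq_false_iff_not]
      constructor
      · rw [hcancel]
        rintro (hneg | hbig)
        · have := Int.natCast_nonneg mm; omega
        · have hble : PySem.Int.bitLength (mm : Int) ≤ n := (bitLength_le_iff mm n).mpr hlt
          have : ((PySem.Int.bitLength (mm : Int) : Nat) : Int) ≤ (n : Int) := by exact_mod_cast hble
          omega
      · rw [hcancel]
        unfold maskOK at hok
        exact hok
    · unfold bcost bcN
      rw [hcancel]

lemma recurse_alt_eq_best (l req : List Int) (cur : Int) :
    recurse_alt l req cur = best l req ((cur + 1).toNat) := by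
  cases l with
  | nil =>
    cases req with
    | nil =>
      have hmt : ∀ m : Nat, maskOK ([] : List Int) [] m = true := by
        intro m
        rw [maskOK_iff]
        simp
      have hfil : (List.range (2 ^ (cur + 1).toNat)).filter (maskOK ([] : List Int) []) = List.range (2 ^ (cur + 1).toNat) :=
        List.filter_eq_self.mpr (fun m _ => by simp [hmt])
      have hmin : ((List.range (2 ^ (cur + 1).toNat)).map bcN).min? = some 0 := by
        rw [List.min?_eq_some_iff]
        constructor
        · exact List.mem_map.mpr ⟨0, List.mem_range.mpr (Nat.pow_pos (by omega)), bcN_zero⟩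
        · intro b _; omega
      simp only [recurse_alt, List.isEmpty_nil, best, cands, hfil, optMin, hmin]
      rfl
    | cons h t =>
      have hmf : ∀ m : Nat, maskOK ([] : List Int) (h :: t) m = false := by
        intro m
        by_contra hc
        rw [Bool.not_eq_false, maskOK_iff] at hc
        have := (hc h).mpr (by simp)
        simp at this
      have hfil : (List.range (2 ^ (cur + 1).toNat)).filter (maskOK ([] : List Int) (h :: t)) = [] := by
        rw [List.filter_eq_nil_iff]
        intro m _
        simp [hmf]
      simp only [recurse_alt, List.isEmpty_cons, best, cands, hfil, List.map_nil, optMin, List.min?_nil]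
      rfl
  | cons o t =>
    have hbits : (if 0 ≤ cur then cur + 1 else 0) = (((cur + 1).toNat : Nat) : Int) := by
      split_ifs with h <;> omega
    simp only [recurse_alt]
    rw [hbits, foldl_altStep, combMin_neg_one]
    unfold best
    exact optMin_congr_mem _ _ (bcosts_eq_cands_mem o t req ((cur + 1).toNat))

-- ===== VERDICT (by name: the statement is the Claim_ definition above) =====
theorem recurse_spec : Claim_equal_recurse := by
  intro outlets required cur _ _
  unfold Spec_recurse
  rw [recurse_eq_refA required ((cur + 1).toNat) cur rfl outlets,
      refA_eq_best required ((cur + 1).toNat) outlets,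
      recurse_alt_eq_best outlets required cur]
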